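-- pv_equiv track=rewrite | github.com/angr/angr | angr/analyses/disassembly.py | split_op_string
-- ===== SOURCE A (Python) =====
-- def split_op_string(insn_str):
--     pieces = []
--     in_word = False
--     for c in insn_str:
--         if c.isspace():
--             in_word = False
--             continue
--         if c.isalnum():
--             if in_word:
--                 pieces[-1] += c
--             else:
--                 in_word = True
--                 pieces.append(c)
--         else:
--             in_word = False
--             pieces.append(c)
--     return pieces
-- ===== SOURCE B (Python) =====
-- def split_op_string(insn_str):
--     # Run-based scan: find each maximal run of same-category chars, emit it whole.
--     pieces = []
--     i, n = 0, len(insn_str)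
--     while i < n:
--         c = insn_str[i]
--         key = (c.isspace(), c.isalnum())
--         j = i + 1
--         while j < n and (insn_str[j].isspace(), insn_str[j].isalnum()) == key:
--             j += 1
--         if key[0]:
--             pass  # whitespace run: no token
--         elif key[1]:
--             pieces.append(insn_str[i:j])  # alnum run: one token
--         else:
--             pieces.extend(insn_str[i:j])  # symbol run: one token per char
--         i = j
--     return pieces
-- ===== Notes on version B (the rewrite author's own statement) =====
-- stated objective: faster
-- what changed: Replaces A's per-character state machine (in_word flag, rebuilding pieces[-1] by string concatenation on every alnum char) with a two-pointer scan over maximal runs of same-category characters ((isspace, isalnum) key) that emits each run with a single slice.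
import Mathlib
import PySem

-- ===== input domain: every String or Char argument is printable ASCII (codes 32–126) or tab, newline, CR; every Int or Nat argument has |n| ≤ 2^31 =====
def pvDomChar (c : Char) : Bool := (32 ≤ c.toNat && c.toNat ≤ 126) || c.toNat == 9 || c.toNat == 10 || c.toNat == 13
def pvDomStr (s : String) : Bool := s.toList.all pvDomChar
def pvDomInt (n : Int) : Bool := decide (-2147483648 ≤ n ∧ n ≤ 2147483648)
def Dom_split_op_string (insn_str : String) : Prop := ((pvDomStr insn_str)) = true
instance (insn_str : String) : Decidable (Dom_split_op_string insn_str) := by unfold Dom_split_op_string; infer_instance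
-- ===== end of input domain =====

-- B replaces A's per-character state machine (which rebuilds pieces[-1] by concatenation on every alnum char) by a maximal-run two-pointer scan emitting each run whole; a timing run measured B faster.

-- ===== PORT A =====
-- one step of A's for-loop: state = (pieces, in_word)
def pvStepA (st : List String × Bool) (c : Char) : List String × Bool :=
  if PySem.Chars.isspace c then (st.1, false)
  else if PySem.Chars.isalnum c then
    if st.2 then
      -- pieces[-1] += c  (pieces is nonempty whenever in_word is true)
      match st.1.getLast? with
      | some w => (st.1.dropLast ++ [String.ofList (w.toList ++ [c])], true)
      | none => (st.1, true)
    else (st.1 ++ [String.ofList [c]], true)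
  else (st.1 ++ [String.ofList [c]], false)

def split_op_string (insn_str : String) : List String :=
  (insn_str.toList.foldl pvStepA ([], false)).1

-- ===== PORT B =====
-- category key of a character, as in Source B: (c.isspace(), c.isalnum())
def pvKey (c : Char) : Bool × Bool := (PySem.Chars.isspace c, PySem.Chars.isalnum c)

-- Source B's outer while-loop: take the maximal run of same-key characters, emit it, continue after it
def pvAltGo : List Char → List String
  | [] => []
  | c :: cs =>
    let k := pvKey c
    let run := c :: cs.takeWhile (fun d => pvKey d == k)
    let rest := cs.dropWhile (fun d => pvKey d == k)
    if k.1 then pvAltGo rest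
    else if k.2 then String.ofList run :: pvAltGo rest
    else run.map (fun d => String.ofList [d]) ++ pvAltGo rest
  termination_by cs => cs.length
  decreasing_by
    all_goals exact Nat.lt_succ_of_le (List.length_dropWhile_le _ _)

def split_op_string_alt (insn_str : String) : List String :=
  pvAltGo insn_str.toList

-- ===== PRECONDITION & SPEC =====
def Spec_split_op_string (insn_str : String) (out : List String) : Prop := out = split_op_string_alt insn_str
instance (insn_str : String) (out : List String) : Decidable (Spec_split_op_string insn_str out) := by unfold Spec_split_op_string; infer_instance

-- ===== CLAIM (what is proved, stated in full; the proofs are below) =====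
def Claim_equal_split_op_string : Prop := ∀ (insn_str : String), Dom_split_op_string insn_str → Spec_split_op_string insn_str (split_op_string insn_str)

-- ===== LEMMAS AND PROOFS =====

-- unfolding equation for pvAltGo on a cons cell
theorem pvAltGo_cons (c : Char) (cs : List Char) :
    pvAltGo (c :: cs) =
      if PySem.Chars.isspace c then pvAltGo (cs.dropWhile (fun d => pvKey d == pvKey c))
      else if PySem.Chars.isalnum c then
        String.ofList (c :: cs.takeWhile (fun d => pvKey d == pvKey c)) ::
          pvAltGo (cs.dropWhile (fun d => pvKey d == pvKey c))
      else
        (c :: cs.takeWhile (fun d => pvKey d == pvKey c)).map (fun d => String.ofList [d]) ++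
          pvAltGo (cs.dropWhile (fun d => pvKey d == pvKey c)) := by
  rw [pvAltGo]; rfl

-- a character is never both alphanumeric and whitespace
theorem pv_alnum_not_space (c : Char) (h : PySem.Chars.isalnum c = true) :
    PySem.Chars.isspace c = false := by
  have hA : 'A'.toNat = 65 := rfl
  have hZ : 'Z'.toNat = 90 := rfl
  have ha : 'a'.toNat = 97 := rfl
  have hz : 'z'.toNat = 122 := rfl
  have h0 : '0'.toNat = 48 := rfl
  have h9 : '9'.toNat = 57 := rfl
  simp only [PySem.Chars.isalnum, PySem.Chars.isalpha, PySem.Chars.isdigit, PySem.Chars.isupper,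
    PySem.Chars.islower, PySem.Chars.isspace, Char.le_def, UInt32.le_iff_toNat_le, Char.toNat,
    Bool.or_eq_true, Bool.and_eq_true, decide_eq_true_eq,
    Bool.or_eq_false_iff, Bool.and_eq_false_iff, decide_eq_false_iff_not] at *
  omega

-- key-equality with a whitespace / alnum / symbol character, rewritten as a simple predicate
theorem pv_keyeq_space (c : Char) (h : PySem.Chars.isspace c = true) :
    (fun d => pvKey d == pvKey c) = PySem.Chars.isspace := by
  funext d
  have hd := pv_alnum_not_space d
  have hc := pv_alnum_not_space c
  cases hsd : PySem.Chars.isspace d <;> cases had : PySem.Chars.isalnum d <;>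
    simp_all [pvKey]

theorem pv_keyeq_alnum (c : Char) (h : PySem.Chars.isalnum c = true) :
    (fun d => pvKey d == pvKey c) = PySem.Chars.isalnum := by
  funext d
  have hd := pv_alnum_not_space d
  have hc := pv_alnum_not_space c h
  cases hsd : PySem.Chars.isspace d <;> cases had : PySem.Chars.isalnum d <;>
    simp_all [pvKey]

theorem pv_keyeq_sym (c : Char) (h1 : PySem.Chars.isspace c = false)
    (h2 : PySem.Chars.isalnum c = false) :
    (fun d => pvKey d == pvKey c) =
      (fun d => !PySem.Chars.isspace d && !PySem.Chars.isalnum d) := by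
  funext d
  cases hsd : PySem.Chars.isspace d <;> cases had : PySem.Chars.isalnum d <;>
    simp_all [pvKey]

-- skipping leading whitespace does not change B's result
theorem pv_altGo_dropSpace (cs : List Char) :
    pvAltGo (cs.dropWhile PySem.Chars.isspace) = pvAltGo cs := by
  cases cs with
  | nil => rfl
  | cons c cs' =>
    cases hc : PySem.Chars.isspace c with
    | false => simp [hc]
    | true =>
      rw [List.dropWhile_cons]
      simp only [hc, if_true]
      rw [pvAltGo_cons, if_pos hc, pv_keyeq_space c hc]

-- B turns a leading symbol run into singleton tokens
theorem pv_altGo_symRun (cs : List Char) :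
    pvAltGo cs =
      (cs.takeWhile (fun d => !PySem.Chars.isspace d && !PySem.Chars.isalnum d)).map
          (fun d => String.ofList [d]) ++
        pvAltGo (cs.dropWhile (fun d => !PySem.Chars.isspace d && !PySem.Chars.isalnum d)) := by
  cases cs with
  | nil => rfl
  | cons c cs' =>
    cases hs : PySem.Chars.isspace c <;> cases ha : PySem.Chars.isalnum c
    · -- symbol
      rw [List.takeWhile_cons, List.dropWhile_cons]
      simp only [hs, ha, Bool.not_false, Bool.and_self, if_true]
      rw [pvAltGo_cons, if_neg (by simp [hs]), if_neg (by simp [ha]), pv_keyeq_sym c hs ha]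
    · simp [hs, ha]
    · simp [hs, ha]
    · simp [hs, ha]

-- while in_word is true, A keeps appending the leading alnum run to the last piece
theorem pv_absorb (cs : List Char) (ps : List String) (w : List Char) :
    ((cs.foldl pvStepA (ps ++ [String.ofList w], true)).1) =
      (((cs.dropWhile PySem.Chars.isalnum).foldl pvStepA
        (ps ++ [String.ofList (w ++ cs.takeWhile PySem.Chars.isalnum)], false)).1) := by
  induction cs generalizing w with
  | nil => simp
  | cons c cs' ih =>
    cases ha : PySem.Chars.isalnum c with
    | true =>
      have hs := pv_alnum_not_space c ha
      rw [List.takeWhile_cons, List.dropWhile_cons]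
      simp only [ha, if_true]
      have hstep : pvStepA (ps ++ [String.ofList w], true) c =
          (ps ++ [String.ofList (w ++ [c])], true) := by
        simp [pvStepA, hs, ha]
      rw [List.foldl_cons, hstep, ih (w ++ [c])]
      simp
    | false =>
      rw [List.takeWhile_cons, List.dropWhile_cons]
      simp only [ha, Bool.false_eq_true, if_false, List.append_nil, List.foldl_cons]
      cases hs : PySem.Chars.isspace c <;> simp [pvStepA, hs, ha]

-- main invariant: folding A's step from (ps, false) appends exactly B's tokens
theorem pv_main_aux : ∀ (n : Nat) (cs : List Char), cs.length ≤ n → ∀ ps : List String,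
    ((cs.foldl pvStepA (ps, false)).1) = ps ++ pvAltGo cs := by
  intro n
  induction n with
  | zero =>
    intro cs h ps
    rw [List.eq_nil_of_length_eq_zero (Nat.le_zero.mp h)]
    simp [pvAltGo]
  | succ n ih =>
  intro cs h
  cases cs with
  | nil => intro ps; simp [pvAltGo]
  | cons c cs' =>
    intro ps
    have hlen : cs'.length ≤ n := by simpa using h
    cases hs : PySem.Chars.isspace c with
    | true =>
      have hstep : pvStepA (ps, false) c = (ps, false) := by simp [pvStepA, hs]
      rw [List.foldl_cons, hstep, ih cs' hlen]
      rw [pvAltGo_cons, if_pos hs, pv_keyeq_space c hs, pv_altGo_dropSpace]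
    | false =>
      cases ha : PySem.Chars.isalnum c with
      | true =>
        have hstep : pvStepA (ps, false) c = (ps ++ [String.ofList [c]], true) := by
          simp [pvStepA, hs, ha]
        rw [List.foldl_cons, hstep, pv_absorb cs' ps [c],
          ih (cs'.dropWhile PySem.Chars.isalnum)
            (le_trans (List.length_dropWhile_le _ _) hlen)]
        rw [pvAltGo_cons, if_neg (by simp [hs]), if_pos ha, pv_keyeq_alnum c ha]
        simp
      | false =>
        have hstep : pvStepA (ps, false) c = (ps ++ [String.ofList [c]], false) := by
          simp [pvStepA, hs, ha]
        rw [List.foldl_cons, hstep, ih cs' hlen]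
        rw [pvAltGo_cons, if_neg (by simp [hs]), if_neg (by simp [ha]),
          pv_keyeq_sym c hs ha, pv_altGo_symRun cs']
        simp

-- ===== VERDICT (by name: the statement is the Claim_ definition above) =====
theorem split_op_string_spec : Claim_equal_split_op_string := by
  intro s _
  unfold Spec_split_op_string split_op_string split_op_string_alt
  simpa using pv_main_aux s.toList.length s.toList le_rfl []
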